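-- pv_equiv track=rewrite | github.com/tabriznaghiyev/python-bootcamp | chapter-1/GroupByGrade.py | group_by_grade
-- ===== SOURCE A (Python) =====
-- def group_by_grade(students):
--     result={}
--     for name,score in students:
--         if score >= 90:
--             grade = "A"
--         elif score >= 80:
--             grade = "B"
--         elif score >= 70:
--             grade = "C"
--         elif score >= 60:
--             grade = "D"
--         else:
--             grade = "F"
--
--         result.setdefault(grade,[]).append(name)
--     return result
-- ===== SOURCE B (Python) =====
-- def group_by_grade(students):
--     # Staged grouping: compute every grade by a closed-form arithmetic index,
--     # fix the bucket order by ordered dedup, then build each bucket with its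
--     # own collection pass (instead of one setdefault-accumulating loop).
--     grades = ["FDCBA"[min(max((score - 50) // 10, 0), 4)] for _, score in students]
--     order = list(dict.fromkeys(grades))
--     return {g: [name for (name, _), gg in zip(students, grades) if gg == g]
--             for g in order}
-- ===== Notes on version B (the rewrite author's own statement) =====
-- stated objective: alternative
-- what changed: replaces A's single loop that accumulates into the dict via setdefault with an if/elif cascade by a staged pipeline: compute every grade with the closed-form index "FDCBA"[min(max((score-50)//10,0),4)], fix the bucket order with an ordered dedup (dict.fromkeys), then build each bucket with its own collection pass over zip(students, grades)
import Mathlib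
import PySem

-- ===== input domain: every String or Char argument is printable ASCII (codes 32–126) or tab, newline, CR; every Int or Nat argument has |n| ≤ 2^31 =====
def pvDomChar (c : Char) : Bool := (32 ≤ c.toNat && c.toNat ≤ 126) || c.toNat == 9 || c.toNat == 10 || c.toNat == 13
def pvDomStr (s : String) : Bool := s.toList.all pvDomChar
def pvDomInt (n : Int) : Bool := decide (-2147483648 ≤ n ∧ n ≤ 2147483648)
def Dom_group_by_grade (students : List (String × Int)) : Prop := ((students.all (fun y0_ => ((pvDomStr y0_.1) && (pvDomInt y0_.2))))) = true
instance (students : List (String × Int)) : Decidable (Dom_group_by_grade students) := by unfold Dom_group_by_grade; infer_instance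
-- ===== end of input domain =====

-- B replaces A's single setdefault-accumulating loop with its if/elif cascade by staged passes:
-- grades via a closed-form arithmetic index, bucket order via ordered dedup, then one
-- collection pass per bucket (objective: alternative; same return value).

-- ===== PORT A =====
-- A's if/elif cascade
def pvGradeCascade (score : Int) : String :=
  if score ≥ 90 then "A"
  else if score ≥ 80 then "B"
  else if score ≥ 70 then "C"
  else if score ≥ 60 then "D"
  else "F"

-- result.setdefault(grade, []).append(name)  ≡  result[grade] = result.get(grade, []) + [name]  = Dict.modify
def group_by_grade (students : List (String × Int)) : List (String × List String) :=
  (students.foldl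
    (fun result p => result.modify (pvGradeCascade p.2) [] (fun l => l ++ [p.1]))
    PySem.Dict.empty).items

-- ===== PORT B =====
-- grade = "FDCBA"[min(max((score - 50) // 10, 0), 4)]  (the index is always in range, so the getD default is never taken)
def pvGradeArith (score : Int) : String :=
  let idx : Int := min (max (PySem.Int.floordiv (score - 50) 10) 0) 4
  ((PySem.Str.pyGet? "FDCBA" idx).map (fun c => String.ofList [c])).getD ""

-- grades = [...]; order = list(dict.fromkeys(grades)); {g: [n for (n,_),gg in zip(students,grades) if gg == g] for g in order}
def group_by_grade_alt (students : List (String × Int)) : List (String × List String) :=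
  let grades := students.map (fun p => pvGradeArith p.2)
  let order := PySem.List.dedup grades
  (order.foldl
    (fun d g => d.insert g
      ((students.zip grades).filterMap (fun pg => if pg.2 == g then some pg.1.1 else none)))
    PySem.Dict.empty).items

-- ===== PRECONDITION & SPEC =====
def Spec_group_by_grade (students : List (String × Int)) (out : List (String × List String)) : Prop := out = group_by_grade_alt students
instance (students : List (String × Int)) (out : List (String × List String)) : Decidable (Spec_group_by_grade students out) := by unfold Spec_group_by_grade; infer_instance

-- ===== CLAIM (what is proved, stated in full; the proofs are below) =====
def Claim_equal_group_by_grade : Prop := ∀ (students : List (String × Int)), Dom_group_by_grade students → Spec_group_by_grade students (group_by_grade students)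

-- ===== LEMMAS AND PROOFS =====

-- the two grade derivations agree on every score
theorem grade_arith_eq_cascade (score : Int) : pvGradeArith score = pvGradeCascade score := by
  unfold pvGradeArith pvGradeCascade
  by_cases h90 : score ≥ 90
  · have h : 4 ≤ PySem.Int.floordiv (score - 50) 10 := by
      rw [PySem.Int.le_floordiv_iff_mul_le (by omega)]; omega
    have hm : min (max (PySem.Int.floordiv (score - 50) 10) 0) 4 = 4 := by omega
    simp only [hm, if_pos h90]; decide
  · by_cases h80 : score ≥ 80
    · have h : PySem.Int.floordiv (score - 50) 10 = 3 := by
        rw [PySem.Int.floordiv_eq_iff_of_pos (by omega)]; omega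
      have hm : min (max (PySem.Int.floordiv (score - 50) 10) 0) 4 = 3 := by omega
      simp only [hm, if_neg h90, if_pos h80]; decide
    · by_cases h70 : score ≥ 70
      · have h : PySem.Int.floordiv (score - 50) 10 = 2 := by
          rw [PySem.Int.floordiv_eq_iff_of_pos (by omega)]; omega
        have hm : min (max (PySem.Int.floordiv (score - 50) 10) 0) 4 = 2 := by omega
        simp only [hm, if_neg h90, if_neg h80, if_pos h70]; decide
      · by_cases h60 : score ≥ 60
        · have h : PySem.Int.floordiv (score - 50) 10 = 1 := by
            rw [PySem.Int.floordiv_eq_iff_of_pos (by omega)]; omega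
          have hm : min (max (PySem.Int.floordiv (score - 50) 10) 0) 4 = 1 := by omega
          simp only [hm, if_neg h90, if_neg h80, if_neg h70, if_pos h60]; decide
        · have h : PySem.Int.floordiv (score - 50) 10 < 1 := by
            rw [PySem.Int.floordiv_lt_iff_lt_mul (by omega)]; omega
          have hm : min (max (PySem.Int.floordiv (score - 50) 10) 0) 4 = 0 := by omega
          simp only [hm, if_neg h90, if_neg h80, if_neg h70, if_neg h60]; decide

-- select-then-project equals a single filterMap pass
theorem filter_map_fst (l : List (String × Int)) (q : String × Int → Bool) :
    (l.filter q).map Prod.fst = l.filterMap (fun p => if q p then some p.1 else none) := by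
  induction l with
  | nil => rfl
  | cons x t ih => by_cases h : q x <;> simp [h, ih]

-- A's modify-accumulating fold, characterised: buckets in first-occurrence order, each with its members
theorem gbg_eq (students : List (String × Int)) :
    group_by_grade students =
      (PySem.List.dedup (students.map (fun p => pvGradeCascade p.2))).map
        (fun g => (g, students.filterMap (fun p => if pvGradeCascade p.2 == g then some p.1 else none))) := by
  unfold group_by_grade
  have hfold : students.foldl (fun result p => result.modify (pvGradeCascade p.2) [] (fun l => l ++ [p.1])) PySem.Dict.empty
      = (students.map (fun p => (pvGradeCascade p.2, p.1))).foldl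
          (fun d q => d.modify q.1 [] (fun l => l ++ [q.2])) PySem.Dict.empty := by
    rw [List.foldl_map]
  rw [hfold]
  have hnd : ((students.map (fun p => (pvGradeCascade p.2, p.1))).foldl
      (fun d q => d.modify q.1 [] (fun l => l ++ [q.2])) PySem.Dict.empty).keys.Nodup := by
    exact PySem.Dict.nodup_keys_foldl_modify_key _ _ _ _ _ (by simp)
  rw [PySem.Dict.items_eq_map_keys _ hnd []]
  rw [PySem.Dict.keys_foldl_modify_key]
  simp only [PySem.Dict.keys_empty, PySem.Set.update_nil_left, PySem.Dict.getD_foldl_modify_append,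
    PySem.Dict.getD_empty, List.nil_append, List.map_map, PySem.List.dedup_eq_ofList]
  apply List.map_congr_left
  intro g _
  congr 1
  rw [List.filter_map, List.map_map]
  simpa using filter_map_fst students (fun p => pvGradeCascade p.2 == g)

-- B's staged construction, characterised by the same form
theorem gbg_alt_eq (students : List (String × Int)) :
    group_by_grade_alt students =
      (PySem.List.dedup (students.map (fun p => pvGradeArith p.2))).map
        (fun g => (g, students.filterMap (fun p => if pvGradeArith p.2 == g then some p.1 else none))) := by
  unfold group_by_grade_alt
  dsimp only
  have hzip : students.zip (students.map (fun p => pvGradeArith p.2))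
      = students.map (fun p => (p, pvGradeArith p.2)) := List.map_prod_left_eq_zip.symm
  rw [hzip]
  have hnodup : (PySem.List.dedup (students.map (fun p => pvGradeArith p.2))).Nodup := PySem.List.nodup_dedup _
  rw [PySem.Dict.items_foldl_insert_fresh (k := fun g => g)
      (v := fun g => (students.map (fun p => (p, pvGradeArith p.2))).filterMap (fun pg => if pg.2 == g then some pg.1.1 else none))
      _ _ (by simp) (by simpa using hnodup)]
  simp only [PySem.Dict.empty, List.filterMap_map]
  apply List.map_congr_left
  intro g _
  simp [Function.comp]

-- ===== VERDICT (by name: the statement is the Claim_ definition above) =====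
theorem group_by_grade_spec : Claim_equal_group_by_grade := by
  intro students _
  unfold Spec_group_by_grade
  rw [gbg_eq, gbg_alt_eq]
  simp only [grade_arith_eq_cascade]
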